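-- pv_equiv track=rewrite | github.com/rakuu-exe/titanengine | src/titanengine/web_app.py | first_sentences
-- ===== SOURCE A (Python) =====
-- def first_sentences(text, limit=8):
--     text = " ".join((text or "").split())
--     if not text:
--         return []
--     parts = []
--     current = []
--     for word in text.split(" "):
--         current.append(word)
--         if word.endswith((".", "?", "!")):
--             sentence = " ".join(current).strip()
--             if len(sentence) > 24:
--                 parts.append(sentence)
--             current = []
--         if len(parts) >= limit:
--             break
--     if not parts and current:
--         parts.append(" ".join(current[:40]))
--     return parts[:limit]
-- ===== SOURCE B (Python) =====
-- def first_sentences(text, limit=8):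
--     norm = " ".join((text or "").split())
--     if not norm:
--         return []
--     if limit <= 0:
--         return []
--     # character-level state machine: a sentence ends at a space that follows
--     # sentence-ending punctuation (or at the end of the text on such a character)
--     sentences = []
--     buf = []
--     prev_end = False
--     for ch in norm:
--         if ch == " " and prev_end:
--             sentences.append("".join(buf))
--             buf = []
--         else:
--             buf.append(ch)
--         prev_end = ch in ".?!"
--     if buf and buf[-1] in ".?!":
--         sentences.append("".join(buf))
--         buf = []
--     qualifying = [s for s in sentences if len(s) > 24]
--     if qualifying:
--         return qualifying[:limit]
--     if buf:
--         return [" ".join("".join(buf).split(" ")[:40])]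
--     return []
-- ===== Notes on version B (the rewrite author's own statement) =====
-- stated objective: alternative
-- what changed: A accumulates words from the split of the normalized text and tests each word's ending inside one loop with a limit break; B never builds a word list: it runs a character-level state machine over the normalized string (flushing a sentence at each space that follows sentence-ending punctuation), then filters the long sentences and slices to the limit.
import Mathlib
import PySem

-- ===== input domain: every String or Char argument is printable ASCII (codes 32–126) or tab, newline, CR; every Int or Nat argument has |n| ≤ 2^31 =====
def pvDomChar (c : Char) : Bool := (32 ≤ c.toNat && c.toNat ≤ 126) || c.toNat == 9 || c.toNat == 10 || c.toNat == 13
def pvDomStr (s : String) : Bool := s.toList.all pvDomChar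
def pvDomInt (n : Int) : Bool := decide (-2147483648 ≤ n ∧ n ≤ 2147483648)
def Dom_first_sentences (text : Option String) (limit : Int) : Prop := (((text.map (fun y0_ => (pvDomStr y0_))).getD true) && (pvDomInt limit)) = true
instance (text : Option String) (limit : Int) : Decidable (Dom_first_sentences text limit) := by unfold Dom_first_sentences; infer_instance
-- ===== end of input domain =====

-- B replaces A's word-accumulation loop (over text.split(" ")) with a character-level
-- state machine over the normalized string, then filters and slices in separate stages.


-- ===== PORT A =====
-- the for-loop of A, with its `break` (state: parts, current)
def fsLoopA (limit : Int) : List String → List String → List String → List String × List String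
  | [], parts, cur => (parts, cur)
  | w :: rest, parts, cur =>
    let cur1 := cur ++ [w]
    let st :=
      if PySem.Str.endswith w "." || PySem.Str.endswith w "?" || PySem.Str.endswith w "!" then
        let s := PySem.Str.strip (PySem.Str.join " " cur1)
        (if 24 < PySem.Str.len s then parts ++ [s] else parts, ([] : List String))
      else (parts, cur1)
    if limit ≤ (st.1.length : Int) then st else fsLoopA limit rest st.1 st.2

def first_sentences (text : Option String) (limit : Int) : List String :=
  let t := PySem.Str.join " " (PySem.Str.split₀ (text.getD ""))
  if t = "" then []
  else
    -- t.split(" "): the separator is the nonempty literal " ", so this is exactly Chars.splitOn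
    let ws := List.map String.ofList (PySem.Chars.splitOn t.toList [' '])
    let r := fsLoopA limit ws [] []
    let parts :=
      if r.1 = [] ∧ ¬ r.2 = [] then
        r.1 ++ [PySem.Str.join " " (PySem.List.slice r.2 none (some 40))]
      else r.1
    PySem.List.slice parts none (some limit)

-- ===== PORT B =====
-- ch in ".?!"
def fsPunct (c : Char) : Bool := c == '.' || c == '?' || c == '!'

-- B's final flush: if buf and buf[-1] in ".?!", append the last sentence
def fsFlush (p : List String × List Char) : List String × List Char :=
  match p.2.getLast? with
  | some c => if fsPunct c then (p.1 ++ [String.ofList p.2], []) else p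
  | none => p

-- one step of B's per-character loop; state = (sentences, buf, prev_end)
def fsStep (st : List String × List Char × Bool) (c : Char) : List String × List Char × Bool :=
  if c == ' ' && st.2.2 then (st.1 ++ [String.ofList st.2.1], [], fsPunct c)
  else (st.1, st.2.1 ++ [c], fsPunct c)

def first_sentences_alt (text : Option String) (limit : Int) : List String :=
  let t := PySem.Str.join " " (PySem.Str.split₀ (text.getD ""))
  if t = "" then []
  else if limit ≤ 0 then []
  else
    let st := t.toList.foldl fsStep ([], [], false)
    let st2 := fsFlush (st.1, st.2.1)
    let qualifying := st2.1.filter (fun s => 24 < PySem.Str.len s)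
    if ¬ qualifying = [] then PySem.List.slice qualifying none (some limit)
    else if ¬ st2.2 = [] then
      -- " ".join("".join(buf).split(" ")[:40]); split(" ") has a nonempty literal separator
      [PySem.Str.join " " (PySem.List.slice (List.map String.ofList (PySem.Chars.splitOn st2.2 [' '])) none (some 40))]
    else []

-- ===== PRECONDITION & SPEC =====
def Spec_first_sentences (text : Option String) (limit : Int) (out : List String) : Prop := out = first_sentences_alt text limit
instance (text : Option String) (limit : Int) (out : List String) : Decidable (Spec_first_sentences text limit out) := by unfold Spec_first_sentences; infer_instance

-- ===== CLAIM (what is proved, stated in full; the proofs are below) =====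
def Claim_equal_first_sentences : Prop := ∀ (text : Option String) (limit : Int), Dom_first_sentences text limit → Spec_first_sentences text limit (first_sentences text limit)

-- ===== LEMMAS AND PROOFS =====

-- a word: nonempty and whitespace-free (what text.split() produces)
def fsWordOK (w : List Char) : Prop := w ≠ [] ∧ ∀ c ∈ w, PySem.Chars.isspace c = false

-- does the word end with '.', '?' or '!'
def fsEndP (w : List Char) : Bool := (w.getLast?.map fsPunct).getD false

-- proof-side grouping of words into sentences (mirrors what both programs compute)
def fsGB : List (List Char) → List (List (List Char)) → List (List Char) → List (List (List Char)) × List (List Char)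
  | [], G, cur => (G, cur)
  | w :: rest, G, cur =>
    if fsEndP w then fsGB rest (G ++ [cur ++ [w]]) [] else fsGB rest G (cur ++ [w])

-- string-level grouping matching A's loop shape
def fsGroupB : List String → List (List String) → List String → List (List String) × List String
  | [], groups, cur => (groups, cur)
  | w :: rest, groups, cur =>
    let cur1 := cur ++ [w]
    if PySem.Str.endswith w "." || PySem.Str.endswith w "?" || PySem.Str.endswith w "!" then
      fsGroupB rest (groups ++ [cur1]) []
    else fsGroupB rest groups cur1

def fsQual (gs : List (List String)) : List String :=
  (gs.map (fun gr => PySem.Str.strip (PySem.Str.join " " gr))).filter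
    (fun s => 24 < PySem.Str.len s)

-- remaining machine input at a word boundary, given the words not yet consumed
def fsGlue (cur ws : List (List Char)) : List Char :=
  (if cur = [] ∨ ws = [] then [] else [' ']) ++ PySem.Chars.join [' '] ws

theorem fsGroupB_append (ws : List String) : ∀ (groups : List (List String)) (cur : List String),
    fsGroupB ws groups cur = (groups ++ (fsGroupB ws [] cur).1, (fsGroupB ws [] cur).2) := by
  induction ws with
  | nil => intro groups cur; simp [fsGroupB]
  | cons w rest ih =>
    intro groups cur
    simp only [fsGroupB]
    split
    · rw [ih (groups ++ [cur ++ [w]]), ih ([] ++ [cur ++ [w]])]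
      simp
    · exact ih groups (cur ++ [w])

theorem fsGB_append (ws : List (List Char)) : ∀ G cur,
    fsGB ws G cur = (G ++ (fsGB ws [] cur).1, (fsGB ws [] cur).2) := by
  induction ws with
  | nil => intro G cur; simp [fsGB]
  | cons w rest ih =>
    intro G cur
    simp only [fsGB]
    split
    · rw [ih (G ++ [cur ++ [w]]), ih ([] ++ [cur ++ [w]])]
      simp
    · exact ih G (cur ++ [w])

theorem fsLoop_main (limit : Int) (ws : List String) :
    ∀ (parts cur : List String), (parts.length : Int) < limit →
    ((fsLoopA limit ws parts cur).1.take limit.toNat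
        = (parts ++ fsQual (fsGroupB ws [] cur).1).take limit.toNat)
    ∧ ((fsLoopA limit ws parts cur).1 = [] →
        parts = [] ∧ fsQual (fsGroupB ws [] cur).1 = []
          ∧ (fsLoopA limit ws parts cur).2 = (fsGroupB ws [] cur).2) := by
  induction ws with
  | nil =>
    intro parts cur _
    simp [fsLoopA, fsGroupB, fsQual]
  | cons w rest ih =>
    intro parts cur hlt
    by_cases hp : (PySem.Str.endswith w "." || PySem.Str.endswith w "?" || PySem.Str.endswith w "!") = true
    · have hG : fsGroupB (w :: rest) [] cur
          = ([cur ++ [w]] ++ (fsGroupB rest [] []).1, (fsGroupB rest [] []).2) := by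
        have h1 : fsGroupB (w :: rest) [] cur = fsGroupB rest ([] ++ [cur ++ [w]]) [] := by
          simp only [fsGroupB]; rw [if_pos hp]
        rw [h1, fsGroupB_append rest ([] ++ [cur ++ [w]]) []]
        simp
      by_cases hq : 24 < PySem.Str.len (PySem.Str.strip (PySem.Str.join " " (cur ++ [w])))
      · have hQ : fsQual (fsGroupB (w :: rest) [] cur).1
            = PySem.Str.strip (PySem.Str.join " " (cur ++ [w])) :: fsQual (fsGroupB rest [] []).1 := by
          rw [hG]
          simp only [fsQual, List.singleton_append, List.map_cons, List.filter_cons]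
          rw [if_pos (by simpa using hq)]
        by_cases hb : limit ≤ (parts.length : Int) + 1
        · have hA : fsLoopA limit (w :: rest) parts cur
              = (parts ++ [PySem.Str.strip (PySem.Str.join " " (cur ++ [w]))], []) := by
            simp only [fsLoopA]
            rw [if_pos hp, if_pos hq]
            exact if_pos (by simp; omega)
          refine ⟨?_, ?_⟩
          · rw [hA, hQ]
            dsimp only
            have e : parts ++ PySem.Str.strip (PySem.Str.join " " (cur ++ [w]))
                  :: fsQual (fsGroupB rest [] []).1
                = (parts ++ [PySem.Str.strip (PySem.Str.join " " (cur ++ [w]))])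
                  ++ fsQual (fsGroupB rest [] []).1 := by simp
            have h' : limit.toNat
                ≤ (parts ++ [PySem.Str.strip (PySem.Str.join " " (cur ++ [w]))]).length := by
              simp; omega
            conv_rhs => rw [e]
            rw [List.take_append_of_le_length h']
          · rw [hA]; intro h; simp at h
        · have hA : fsLoopA limit (w :: rest) parts cur
              = fsLoopA limit rest (parts ++ [PySem.Str.strip (PySem.Str.join " " (cur ++ [w]))]) [] := by
            simp only [fsLoopA]
            rw [if_pos hp, if_pos hq]
            exact if_neg (by simp; omega)
          have ih' := ih (parts ++ [PySem.Str.strip (PySem.Str.join " " (cur ++ [w]))]) []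
            (by simp; omega)
          refine ⟨?_, ?_⟩
          · rw [hA, hQ, ih'.1]; simp
          · rw [hA]; intro h
            have := (ih'.2 h).1
            simp at this
      · have hQ : fsQual (fsGroupB (w :: rest) [] cur).1 = fsQual (fsGroupB rest [] []).1 := by
          rw [hG]
          simp only [fsQual, List.singleton_append, List.map_cons, List.filter_cons]
          rw [if_neg (by simpa using hq)]
        have hA : fsLoopA limit (w :: rest) parts cur = fsLoopA limit rest parts [] := by
          simp only [fsLoopA]
          rw [if_pos hp, if_neg hq]
          exact if_neg (by simp; omega)
        have ih' := ih parts [] hlt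
        refine ⟨?_, ?_⟩
        · rw [hA, hQ]; exact ih'.1
        · rw [hA, hQ, hG]; intro h
          exact ⟨(ih'.2 h).1, (ih'.2 h).2.1, (ih'.2 h).2.2⟩
    · have hA : fsLoopA limit (w :: rest) parts cur = fsLoopA limit rest parts (cur ++ [w]) := by
        simp only [fsLoopA]
        rw [if_neg hp]
        exact if_neg (by simp; omega)
      have hG : fsGroupB (w :: rest) [] cur = fsGroupB rest [] (cur ++ [w]) := by
        simp only [fsGroupB]; rw [if_neg hp]
      rw [hA, hG]
      exact ih parts (cur ++ [w]) hlt

theorem fsLoopA_nonpos (limit : Int) (h0 : limit ≤ 0) (ws : List String) :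
    (fsLoopA limit ws [] []).1.length ≤ 1 := by
  cases ws with
  | nil => simp [fsLoopA]
  | cons w rest =>
    simp only [fsLoopA]
    by_cases hp : (PySem.Str.endswith w "." || PySem.Str.endswith w "?" || PySem.Str.endswith w "!") = true
    · rw [if_pos hp]
      by_cases hq : 24 < PySem.Str.len (PySem.Str.strip (PySem.Str.join " " ([] ++ [w])))
      · rw [if_pos hq, if_pos (by simp; omega)]; simp
      · rw [if_neg hq, if_pos (by simp; omega)]; simp
    · rw [if_neg hp, if_pos (by simp; omega)]; simp

theorem fsSlice_nonpos (limit : Int) (l : List String) (h1 : l.length ≤ 1) (h0 : limit ≤ 0) :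
    PySem.List.slice l none (some limit) = [] := by
  match l, h1 with
  | [], _ => simp [PySem.List.slice]
  | [a], _ =>
    simp only [PySem.List.slice, PySem.List.clampIdx]
    norm_num
    split_ifs <;> simp_all
    omega

theorem fsBody_nonpos (limit : Int) (h0 : limit ≤ 0) (ws : List String) :
    PySem.List.slice
        (if (fsLoopA limit ws [] []).1 = [] ∧ ¬ (fsLoopA limit ws [] []).2 = [] then
          (fsLoopA limit ws [] []).1
            ++ [PySem.Str.join " " (PySem.List.slice (fsLoopA limit ws [] []).2 none (some 40))]
        else (fsLoopA limit ws [] []).1) none (some limit) = [] := by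
  apply fsSlice_nonpos limit _ _ h0
  have := fsLoopA_nonpos limit h0 ws
  split
  · next hcase => rw [hcase.1]; simp
  · exact this

theorem fsBody_pos (limit : Int) (hl : 1 ≤ limit) (ws : List String) :
    PySem.List.slice
        (if (fsLoopA limit ws [] []).1 = [] ∧ ¬ (fsLoopA limit ws [] []).2 = [] then
          (fsLoopA limit ws [] []).1
            ++ [PySem.Str.join " " (PySem.List.slice (fsLoopA limit ws [] []).2 none (some 40))]
        else (fsLoopA limit ws [] []).1) none (some limit)
      = (if ¬ fsQual (fsGroupB ws [] []).1 = [] then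
            PySem.List.slice (fsQual (fsGroupB ws [] []).1) none (some limit)
          else if ¬ (fsGroupB ws [] []).2 = [] then
            [PySem.Str.join " " (PySem.List.slice (fsGroupB ws [] []).2 none (some 40))]
          else []) := by
  obtain ⟨h1, h2⟩ := fsLoop_main limit ws [] [] (by simpa using hl)
  rw [List.nil_append] at h1
  have hn : 1 ≤ limit.toNat := by omega
  by_cases hr : (fsLoopA limit ws [] []).1 = []
  · obtain ⟨-, hQ0, hc⟩ := h2 hr
    rw [hr, hQ0, hc]
    by_cases hc2 : (fsGroupB ws [] []).2 = []
    · simp [hc2, PySem.List.slice]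
    · rw [if_pos ⟨rfl, hc2⟩, if_neg (by simp), if_pos hc2]
      rw [List.nil_append, PySem.List.slice_to _ (by omega)]
      obtain ⟨m, hm⟩ : ∃ m, limit.toNat = m + 1 := ⟨limit.toNat - 1, by omega⟩
      rw [hm]
      simp
  · have hQ : ¬ fsQual (fsGroupB ws [] []).1 = [] := by
      intro hq0
      rw [hq0] at h1
      simp only [List.take_nil] at h1
      rw [List.take_eq_nil_iff] at h1
      rcases h1 with h | h
      · omega
      · exact hr h
    rw [if_neg (by intro hand; exact hr hand.1), if_pos hQ]
    rw [PySem.List.slice_to _ (by omega), PySem.List.slice_to _ (by omega)]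
    exact h1

-- singleton suffix = last character
theorem fsEndswith_last (w : List Char) (c : Char) :
    PySem.Chars.endswith w [c] = (w.getLast? == some c) := by
  have h : [c].isSuffixOf w = true ↔ w.getLast? = some c := by
    rw [List.isSuffixOf_iff_suffix]
    constructor
    · rintro ⟨p, rfl⟩; exact List.getLast?_append_of_ne_nil p (by simp)
    · intro h
      obtain ⟨l, rfl⟩ := List.getLast?_eq_some_iff.mp h
      exact ⟨l, rfl⟩
  simp only [PySem.Chars.endswith]
  rw [Bool.eq_iff_iff, h, beq_iff_eq]

-- the string-level test A makes is fsEndP on the characters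
theorem fsEnds_eq (w : List Char) :
    (PySem.Str.endswith (String.ofList w) "." || PySem.Str.endswith (String.ofList w) "?"
      || PySem.Str.endswith (String.ofList w) "!") = fsEndP w := by
  simp only [PySem.Str.endswith_eq, String.toList_ofList]
  have hd : (".").toList = ['.'] := by decide
  have hq : ("?").toList = ['?'] := by decide
  have he : ("!").toList = ['!'] := by decide
  rw [hd, hq, he, fsEndswith_last, fsEndswith_last, fsEndswith_last]
  cases h : w.getLast? with
  | none => simp [fsEndP, h]
  | some c => simp [fsEndP, h, fsPunct]

-- fsGroupB over the string images of char-level words is the image of fsGB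
theorem fsGroupB_eq_fsGB (wl : List (List Char)) : ∀ G cur,
    fsGroupB (wl.map String.ofList) (G.map (List.map String.ofList)) (cur.map String.ofList)
      = ((fsGB wl G cur).1.map (List.map String.ofList), (fsGB wl G cur).2.map String.ofList) := by
  induction wl with
  | nil => intro G cur; simp [fsGroupB, fsGB]
  | cons w rest ih =>
    intro G cur
    simp only [fsGroupB, fsGB, List.map_cons, fsEnds_eq]
    by_cases hp : fsEndP w = true
    · rw [if_pos hp, if_pos hp]
      have e1 : cur.map String.ofList ++ [String.ofList w] = (cur ++ [w]).map String.ofList := by simp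
      have e2 : G.map (List.map String.ofList) ++ [(cur ++ [w]).map String.ofList]
          = (G ++ [cur ++ [w]]).map (List.map String.ofList) := by simp
      rw [e1, e2]
      have := ih (G ++ [cur ++ [w]]) []
      simpa using this
    · rw [if_neg hp, if_neg hp]
      have e1 : cur.map String.ofList ++ [String.ofList w] = (cur ++ [w]).map String.ofList := by simp
      rw [e1]
      exact ih G (cur ++ [w])

-- joining a snoc
theorem fsJoin_snoc (l : List (List Char)) (w : List Char) (h : l ≠ []) :
    PySem.Chars.join [' '] (l ++ [w]) = PySem.Chars.join [' '] l ++ ' ' :: w := by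
  induction l with
  | nil => simp at h
  | cons x t ih =>
    cases t with
    | nil => simp [PySem.Chars.join_cons_cons, PySem.Chars.join_singleton]
    | cons y u =>
      simp only [List.cons_append]
      rw [PySem.Chars.join_cons_cons]
      rw [show y :: (u ++ [w]) = (y :: u) ++ [w] from by simp]
      rw [ih (by simp), PySem.Chars.join_cons_cons]
      simp

theorem fsJoin_ne_nil (l : List (List Char)) (h : l ≠ []) (hw : ∀ w ∈ l, w ≠ []) :
    PySem.Chars.join [' '] l ≠ [] := by
  cases l with
  | nil => simp at h
  | cons x t =>
    cases t with
    | nil =>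
      rw [PySem.Chars.join_singleton]
      exact hw x (by simp)
    | cons y u =>
      rw [PySem.Chars.join_cons_cons]
      have : x ≠ [] := hw x (by simp)
      simp [this]

theorem fsJoin_getLast (l : List (List Char)) (w : List Char) (h : w ≠ []) :
    (PySem.Chars.join [' '] (l ++ [w])).getLast? = w.getLast? := by
  cases l with
  | nil => simp [PySem.Chars.join_singleton]
  | cons x t =>
    rw [fsJoin_snoc _ _ (by simp)]
    rw [show PySem.Chars.join [' '] (x :: t) ++ ' ' :: w
        = (PySem.Chars.join [' '] (x :: t) ++ [' ']) ++ w by simp]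
    exact List.getLast?_append_of_ne_nil _ h

-- strip is the identity on a join of whitespace-free nonempty words
theorem fsStrip_join (l : List (List Char)) (hw : ∀ w ∈ l, fsWordOK w) :
    PySem.Chars.strip (PySem.Chars.join [' '] l) = PySem.Chars.join [' '] l := by
  rcases List.eq_nil_or_concat l with rfl | ⟨l', w, rfl⟩
  · simp [PySem.Chars.strip, PySem.Chars.lstrip, PySem.Chars.rstrip, PySem.Chars.join_nil]
  · rw [List.concat_eq_append] at *
    have hall : ∀ u ∈ l' ++ [w], fsWordOK u := hw
    -- head character is the head of the first word, last character the last of the last word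
    have hw : fsWordOK w := hall w (by simp)
    obtain ⟨d, w', hrev⟩ : ∃ d w', w.reverse = d :: w' := by
      cases hrw : w.reverse with
      | nil => exact absurd (by simpa using congrArg List.reverse hrw) hw.1
      | cons d w' => exact ⟨d, w', rfl⟩
    have hd : PySem.Chars.isspace d = false := by
      refine hw.2 d ?_
      have : d ∈ w.reverse := by rw [hrev]; simp
      simpa using this
    -- lstrip is the identity: the first character is non-space
    have hl : PySem.Chars.lstrip (PySem.Chars.join [' '] (l' ++ [w]))
        = PySem.Chars.join [' '] (l' ++ [w]) := by
      rcases hfirst : l' ++ [w] with _ | ⟨x, t⟩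
      · simp at hfirst
      · have hxmem : x ∈ l' ++ [w] := by rw [hfirst]; simp
        have hx : fsWordOK x := hall x hxmem
        obtain ⟨c, x', rfl⟩ : ∃ c x', x = c :: x' := by
          cases x with
          | nil => exact absurd rfl hx.1
          | cons c x' => exact ⟨c, x', rfl⟩
        have hc : PySem.Chars.isspace c = false := hx.2 c (by simp)
        cases t with
        | nil =>
          rw [PySem.Chars.join_singleton]
          simp [PySem.Chars.lstrip, hc]
        | cons y u =>
          rw [PySem.Chars.join_cons_cons]
          simp [PySem.Chars.lstrip, hc]
    rw [PySem.Chars.strip, hl]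
    -- rstrip is the identity: the last character is non-space
    have hrevj : (PySem.Chars.join [' '] (l' ++ [w])).reverse
        = d :: (w' ++ (if l' = [] then [] else [' '] ++ (PySem.Chars.join [' '] l').reverse)) := by
      rcases eq_or_ne l' [] with rfl | hne
      · simp [PySem.Chars.join_singleton, hrev]
      · rw [fsJoin_snoc _ _ hne]
        simp [hrev, hne]
    rw [PySem.Chars.rstrip, hrevj, List.dropWhile_cons, hd]
    have hwid : w = w'.reverse ++ [d] := by
      have := congrArg List.reverse hrev
      simpa using this
    rcases eq_or_ne l' [] with rfl | hne
    · simp [PySem.Chars.join_singleton, hwid]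
    · rw [if_neg hne, fsJoin_snoc _ _ hne]
      simp [hwid]

-- feeding one space-free word to the machine
theorem fsFeed_word : ∀ (w : List Char), (∀ c ∈ w, c ≠ ' ') →
    ∀ (s : List String) (b : List Char) (p : Bool),
    w.foldl fsStep (s, b, p) = (s, b ++ w, w.foldl (fun _ c => fsPunct c) p) := by
  intro w
  induction w with
  | nil => intro _ s b p; simp
  | cons c w' ih =>
    intro hw s b p
    have hc : (c == ' ') = false := by simpa using hw c (by simp)
    have hstep : fsStep (s, b, p) c = (s, b ++ [c], fsPunct c) := by simp [fsStep, hc]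
    rw [List.foldl_cons, hstep, List.foldl_cons,
        ih (fun d hd => hw d (by simp [hd])) s (b ++ [c]) (fsPunct c)]
    simp

theorem fsFoldl_last (w : List Char) (h : w ≠ []) (p : Bool) :
    w.foldl (fun _ c => fsPunct c) p = fsEndP w := by
  induction w generalizing p with
  | nil => simp at h
  | cons c t ih =>
    cases t with
    | nil => simp [fsEndP]
    | cons y u =>
      rw [List.foldl_cons, ih (by simp)]
      simp [fsEndP]

-- fsGB preserves the word facts
theorem fsGB_ok (wl : List (List Char)) : ∀ G cur,
    (∀ w ∈ wl, fsWordOK w) → (∀ w ∈ cur, fsWordOK w) → (∀ g ∈ G, g ≠ [] ∧ ∀ w ∈ g, fsWordOK w) →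
    (∀ g ∈ (fsGB wl G cur).1, g ≠ [] ∧ ∀ w ∈ g, fsWordOK w)
      ∧ (∀ w ∈ (fsGB wl G cur).2, fsWordOK w) := by
  induction wl with
  | nil =>
    intro G cur _ hcur hG
    exact ⟨by simpa [fsGB] using hG, by simpa [fsGB] using hcur⟩
  | cons w rest ih =>
    intro G cur hwl hcur hG
    have hw : fsWordOK w := hwl w (by simp)
    have hrest : ∀ u ∈ rest, fsWordOK u := fun u hu => hwl u (by simp [hu])
    simp only [fsGB]
    split
    · refine ih (G ++ [cur ++ [w]]) [] hrest (by simp) ?_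
      intro g hg
      rcases List.mem_append.mp hg with hg | hg
      · exact hG g hg
      · simp at hg
        subst hg
        refine ⟨by simp, ?_⟩
        intro u hu
        rcases List.mem_append.mp hu with hu | hu
        · exact hcur u hu
        · simp at hu; subst hu; exact hw
    · refine ih G (cur ++ [w]) hrest ?_ hG
      intro u hu
      rcases List.mem_append.mp hu with hu | hu
      · exact hcur u hu
      · simp at hu; subst hu; exact hw

theorem fsJoin_cons (w : List Char) (rest : List (List Char)) :
    PySem.Chars.join [' '] (w :: rest)
      = w ++ (if rest = [] then [] else ' ' :: PySem.Chars.join [' '] rest) := by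
  cases rest with
  | nil => simp [PySem.Chars.join_singleton]
  | cons y u => rw [PySem.Chars.join_cons_cons]; simp

theorem fsNoSpace (w : List Char) (hw : fsWordOK w) : ∀ c ∈ w, c ≠ ' ' := by
  intro c hc he
  subst he
  have := hw.2 ' ' hc
  simp [PySem.Chars.isspace] at this

theorem fsEndP_getLast (w : List Char) (h : w ≠ []) :
    ∃ d, w.getLast? = some d ∧ fsEndP w = fsPunct d := by
  cases hg : w.getLast? with
  | none => exact absurd (List.getLast?_eq_none_iff.mp hg) h
  | some d => exact ⟨d, rfl, by simp [fsEndP, hg]⟩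

-- feeding sep ++ word from a boundary state
theorem fsFeed_boundary (w : List Char) (hw : fsWordOK w) (sents : List String)
    (cur : List (List Char)) :
    ((if cur = [] then [] else [' ']) ++ w).foldl fsStep
        (sents, PySem.Chars.join [' '] cur, false)
      = (sents, PySem.Chars.join [' '] (cur ++ [w]), fsEndP w) := by
  rcases eq_or_ne cur [] with rfl | hne
  · rw [if_pos rfl, List.nil_append,
        fsFeed_word w (fsNoSpace w hw) sents (PySem.Chars.join [' '] []) false,
        fsFoldl_last w hw.1]
    simp [PySem.Chars.join_nil, PySem.Chars.join_singleton]
  · rw [if_neg hne, List.foldl_append]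
    have hstep : [' '].foldl fsStep (sents, PySem.Chars.join [' '] cur, false)
        = (sents, PySem.Chars.join [' '] cur ++ [' '], false) := by
      simp [fsStep, fsPunct]
    rw [hstep, fsFeed_word w (fsNoSpace w hw) sents _ false, fsFoldl_last w hw.1,
        fsJoin_snoc cur w hne]
    simp

-- the machine, run from a word boundary, computes the image of fsGB
theorem fsMachine_main : ∀ (ws : List (List Char)) (sents : List String) (cur : List (List Char)),
    (∀ w ∈ ws, fsWordOK w) → (∀ w ∈ cur, fsWordOK w ∧ fsEndP w = false) →
    (fsFlush (((fsGlue cur ws).foldl fsStep (sents, PySem.Chars.join [' '] cur, false)).1,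
              ((fsGlue cur ws).foldl fsStep (sents, PySem.Chars.join [' '] cur, false)).2.1))
      = (sents ++ (fsGB ws [] cur).1.map (fun g => String.ofList (PySem.Chars.join [' '] g)),
         PySem.Chars.join [' '] (fsGB ws [] cur).2) := by
  intro ws
  induction ws with
  | nil =>
    intro sents cur _ hcur
    have hglue : fsGlue cur [] = [] := by simp [fsGlue, PySem.Chars.join_nil]
    rw [hglue]
    simp only [List.foldl_nil, fsGB, List.map_nil, List.append_nil]
    rcases List.eq_nil_or_concat cur with rfl | ⟨l', w, rfl⟩
    · simp [fsFlush, PySem.Chars.join_nil]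
    · rw [List.concat_eq_append] at *
      have hcw := hcur w (by simp)
      obtain ⟨d, hd, he⟩ := fsEndP_getLast w hcw.1.1
      have hP : fsPunct d = false := by rw [← he]; exact hcw.2
      simp only [fsFlush, fsJoin_getLast l' w hcw.1.1, hd, hP]
      simp
  | cons w rest ih =>
    intro sents cur hws hcur
    have hw : fsWordOK w := hws w (by simp)
    have hrest : ∀ u ∈ rest, fsWordOK u := fun u hu => hws u (by simp [hu])
    have hglue : fsGlue cur (w :: rest)
        = ((if cur = [] then [] else [' ']) ++ w)
          ++ (if rest = [] then [] else ' ' :: PySem.Chars.join [' '] rest) := by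
      simp only [fsGlue, fsJoin_cons]
      rcases eq_or_ne cur [] with rfl | hne
      · simp
      · simp [hne]
    rw [hglue, List.foldl_append, fsFeed_boundary w hw sents cur]
    by_cases hend : fsEndP w = true
    · have hGB : fsGB (w :: rest) [] cur
          = ([cur ++ [w]] ++ (fsGB rest [] []).1, (fsGB rest [] []).2) := by
        have h1 : fsGB (w :: rest) [] cur = fsGB rest ([] ++ [cur ++ [w]]) [] := by
          simp only [fsGB]; rw [if_pos hend]
        rw [h1, fsGB_append rest ([] ++ [cur ++ [w]]) []]
        simp
      cases rest with
      | nil =>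
        rw [show (if ([] : List (List Char)) = [] then ([] : List Char)
              else ' ' :: PySem.Chars.join [' '] []) = [] from by simp]
        simp only [List.foldl_nil]
        obtain ⟨d, hd, he⟩ := fsEndP_getLast w hw.1
        have hP : fsPunct d = true := by rw [← he]; exact hend
        have hlast : (PySem.Chars.join [' '] (cur ++ [w])).getLast? = some d := by
          rw [fsJoin_getLast cur w hw.1, hd]
        simp only [fsFlush]
        rw [hlast]
        simp only [hP, if_true]
        rw [hGB]
        simp [fsGB, PySem.Chars.join_nil]
      | cons y u =>
        rw [if_neg (by simp)]
        have hstep : fsStep (sents, PySem.Chars.join [' '] (cur ++ [w]), fsEndP w) ' '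
            = (sents ++ [String.ofList (PySem.Chars.join [' '] (cur ++ [w]))], [], false) := by
          simp [fsStep, hend, fsPunct]
        rw [List.foldl_cons, hstep]
        have hglue2 : PySem.Chars.join [' '] (y :: u) = fsGlue [] (y :: u) := by
          simp [fsGlue]
        rw [hglue2]
        have H := ih (sents ++ [String.ofList (PySem.Chars.join [' '] (cur ++ [w]))]) []
          (fun u hu => hrest u hu) (by simp)
        rw [PySem.Chars.join_nil] at H
        rw [H, hGB]
        simp
    · have hend' : fsEndP w = false := by simpa using hend
      have hGB : fsGB (w :: rest) [] cur = fsGB rest [] (cur ++ [w]) := by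
        simp only [fsGB]; rw [if_neg (by simp [hend'])]
      have hglue3 : (if rest = [] then [] else ' ' :: PySem.Chars.join [' '] rest)
          = fsGlue (cur ++ [w]) rest := by
        rcases eq_or_ne rest [] with rfl | hne
        · simp [fsGlue, PySem.Chars.join_nil]
        · simp [fsGlue, hne]
      have hcur' : ∀ u ∈ cur ++ [w], fsWordOK u ∧ fsEndP u = false := by
        intro u hu
        rcases List.mem_append.mp hu with hu | hu
        · exact hcur u hu
        · simp at hu; subst hu; exact ⟨hw, hend'⟩
      rw [hend', hglue3, ih sents (cur ++ [w]) hrest hcur', hGB]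

-- splitting the join of space-free nonempty words on the separator gives the words back
theorem fsSplitOn_go_word : ∀ (w : List Char), (∀ c ∈ w, c ≠ ' ') →
    ∀ (f : Nat) (l cur : List Char) (acc : List (List Char)),
    PySem.Chars.splitOn.go [' '] (w.length + f) (w ++ l) cur acc
      = PySem.Chars.splitOn.go [' '] f l (w.reverse ++ cur) acc := by
  intro w
  induction w with
  | nil => intro _ f l cur acc; simp
  | cons c w' ih =>
    intro hw f l cur acc
    have hc : c ≠ ' ' := hw c (by simp)
    have hpre : [' '].isPrefixOf (c :: (w' ++ l)) = false := by
      simp [List.isPrefixOf]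
      exact fun h => absurd h.symm hc
    rw [show (c :: w').length + f = (w'.length + f) + 1 from by simp; omega]
    rw [show (c :: w') ++ l = c :: (w' ++ l) from by simp]
    rw [show PySem.Chars.splitOn.go [' '] ((w'.length + f) + 1) (c :: (w' ++ l)) cur acc
        = PySem.Chars.splitOn.go [' '] (w'.length + f) (w' ++ l) (c :: cur) acc from by
      simp [PySem.Chars.splitOn.go, hpre]]
    rw [ih (fun d hd => hw d (by simp [hd])) f l (c :: cur) acc]
    simp

theorem fsSplitOn_go_join : ∀ (wl : List (List Char)), (∀ w ∈ wl, ∀ c ∈ w, c ≠ ' ') → wl ≠ [] →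
    ∀ (f : Nat) (acc : List (List Char)), (PySem.Chars.join [' '] wl).length ≤ f →
    PySem.Chars.splitOn.go [' '] f (PySem.Chars.join [' '] wl) [] acc = acc.reverse ++ wl := by
  intro wl
  induction wl with
  | nil => intro _ hne; simp at hne
  | cons w t ih =>
    intro hw _ f acc hf
    have hwsp : ∀ c ∈ w, c ≠ ' ' := hw w (by simp)
    cases t with
    | nil =>
      rw [PySem.Chars.join_singleton] at hf ⊢
      obtain ⟨f', rfl⟩ : ∃ f', f = w.length + f' := ⟨f - w.length, by omega⟩
      conv_lhs => rw [show w = w ++ [] from by simp]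
      rw [show (w ++ ([] : List Char)).length + f' = w.length + f' from by simp] at *
      rw [fsSplitOn_go_word w hwsp f' [] [] acc]
      cases f' with
      | zero => simp [PySem.Chars.splitOn.go]
      | succ f'' => simp [PySem.Chars.splitOn.go]
    | cons y u =>
      rw [PySem.Chars.join_cons_cons] at hf ⊢
      have hlen : (w ++ [' '] ++ PySem.Chars.join [' '] (y :: u)).length
          = w.length + 1 + (PySem.Chars.join [' '] (y :: u)).length := by simp; omega
      obtain ⟨f', rfl⟩ : ∃ f', f = w.length + (f' + 1) := by
        rw [hlen] at hf
        exact ⟨f - w.length - 1, by omega⟩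
      rw [show w ++ [' '] ++ PySem.Chars.join [' '] (y :: u)
          = w ++ (' ' :: PySem.Chars.join [' '] (y :: u)) from by simp]
      rw [fsSplitOn_go_word w hwsp (f' + 1) _ [] acc]
      have hpre : [' '].isPrefixOf (' ' :: PySem.Chars.join [' '] (y :: u)) = true := by
        simp [List.isPrefixOf]
      rw [show PySem.Chars.splitOn.go [' '] (f' + 1) (' ' :: PySem.Chars.join [' '] (y :: u))
            (w.reverse ++ []) acc
          = PySem.Chars.splitOn.go [' '] f' (PySem.Chars.join [' '] (y :: u)) []
            ((w.reverse ++ []).reverse :: acc) from by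
        simp [PySem.Chars.splitOn.go, hpre]]
      rw [ih (fun u hu => hw u (by simp [hu])) (by simp) f' _ (by rw [hlen] at hf; omega)]
      simp

theorem fsSplitOn_join (wl : List (List Char)) (hw : ∀ w ∈ wl, ∀ c ∈ w, c ≠ ' ') (hne : wl ≠ []) :
    PySem.Chars.splitOn (PySem.Chars.join [' '] wl) [' '] = wl := by
  rw [PySem.Chars.splitOn]
  rw [fsSplitOn_go_join wl hw hne _ [] (by omega)]
  simp

-- every word of split₀'s output is nonempty and whitespace-free
theorem fsSplit₀_go_ok (s : List Char) : ∀ (cur : List Char) (acc : List (List Char)),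
    (∀ c ∈ cur, PySem.Chars.isspace c = false) → (∀ w ∈ acc, fsWordOK w) →
    ∀ w ∈ PySem.Chars.split₀.go s cur acc, fsWordOK w := by
  induction s with
  | nil =>
    intro cur acc hcur hacc w hwmem
    by_cases hc : cur.isEmpty
    · rw [show PySem.Chars.split₀.go [] cur acc = acc.reverse from by
        simp [PySem.Chars.split₀.go, hc]] at hwmem
      exact hacc w (by simpa using hwmem)
    · rw [show PySem.Chars.split₀.go [] cur acc = (cur.reverse :: acc).reverse from by
        simp [PySem.Chars.split₀.go, hc]] at hwmem
      simp at hwmem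
      rcases hwmem with hwmem | hwmem
      · exact hacc w hwmem
      · subst hwmem
        refine ⟨by simpa [List.isEmpty_iff] using hc, ?_⟩
        intro d hd
        exact hcur d (by simpa using hd)
  | cons c rest ih =>
    intro cur acc hcur hacc w hwmem
    rw [show PySem.Chars.split₀.go (c :: rest) cur acc
        = (if PySem.Chars.isspace c then (if cur.isEmpty then PySem.Chars.split₀.go rest [] acc
            else PySem.Chars.split₀.go rest [] (cur.reverse :: acc))
           else PySem.Chars.split₀.go rest (c :: cur) acc) from by
      simp [PySem.Chars.split₀.go]] at hwmem
    by_cases hsp : PySem.Chars.isspace c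
    · rw [if_pos hsp] at hwmem
      by_cases hc : cur.isEmpty
      · rw [if_pos hc] at hwmem
        exact ih [] acc (by simp) hacc w hwmem
      · rw [if_neg hc] at hwmem
        refine ih [] (cur.reverse :: acc) (by simp) ?_ w hwmem
        intro g hg
        rcases List.mem_cons.mp hg with hg | hg
        · subst hg
          refine ⟨by simpa [List.isEmpty_iff] using hc, ?_⟩
          intro d hd
          exact hcur d (by simpa using hd)
        · exact hacc g hg
    · rw [if_neg hsp] at hwmem
      refine ih (c :: cur) acc ?_ hacc w hwmem
      intro d hd
      rcases List.mem_cons.mp hd with hd | hd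
      · subst hd; simpa using hsp
      · exact hcur d hd

theorem fsSplit₀_ok (s : List Char) : ∀ w ∈ PySem.Chars.split₀ s, fsWordOK w := by
  rw [PySem.Chars.split₀]
  exact fsSplit₀_go_ok s [] [] (by simp) (by simp)

-- a sentence built by A (strip of the " "-join) is the raw join B accumulates
theorem fsSent_eq (g : List (List Char)) (hg : ∀ w ∈ g, fsWordOK w) :
    PySem.Str.strip (PySem.Str.join " " (g.map String.ofList))
      = String.ofList (PySem.Chars.join [' '] g) := by
  apply String.toList_inj.mp
  rw [PySem.Str.toList_strip, PySem.Str.toList_join]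
  have hmap : (g.map String.ofList).map String.toList = g := by
    simp [List.map_map, Function.comp_def, String.toList_ofList]
  rw [hmap, show (" ").toList = [' '] from by decide, fsStrip_join g hg, String.toList_ofList]

theorem fsQual_eq (G : List (List (List Char))) (hG : ∀ g ∈ G, ∀ w ∈ g, fsWordOK w) :
    fsQual (G.map (List.map String.ofList))
      = (G.map (fun g => String.ofList (PySem.Chars.join [' '] g))).filter
          (fun s => 24 < PySem.Str.len s) := by
  unfold fsQual
  rw [List.map_map]
  congr 1
  apply List.map_congr_left
  intro g hg
  exact fsSent_eq g (hG g hg)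

-- ===== VERDICT (by name: the statement is the Claim_ definition above) =====
theorem first_sentences_spec : Claim_equal_first_sentences := by
  unfold Claim_equal_first_sentences
  intro text limit _
  unfold Spec_first_sentences
  simp only [first_sentences, first_sentences_alt]
  by_cases ht : PySem.Str.join " " (PySem.Str.split₀ (text.getD "")) = ""
  · rw [if_pos ht, if_pos ht]
  · rw [if_neg ht, if_neg ht]
    by_cases hl : limit ≤ 0
    · rw [if_pos hl]
      exact fsBody_nonpos limit hl _
    · rw [if_neg hl]
      set t := PySem.Str.join " " (PySem.Str.split₀ (text.getD "")) with hT
      set wl := (PySem.Str.split₀ (text.getD "")).map String.toList with hwl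
      have htl : t.toList = PySem.Chars.join [' '] wl := by
        rw [hT, PySem.Str.toList_join, show (" ").toList = [' '] from by decide, hwl]
      have hok : ∀ w ∈ wl, fsWordOK w := by
        intro w hw
        rw [hwl, PySem.Str.split₀_map_toList] at hw
        exact fsSplit₀_ok _ w hw
      have hwlne : wl ≠ [] := by
        intro h0
        apply ht
        rw [← String.toList_eq_nil_iff, htl, h0, PySem.Chars.join_nil]
      have hsp : ∀ w ∈ wl, ∀ c ∈ w, c ≠ ' ' := fun w hw => fsNoSpace w (hok w hw)
      have hsplit : PySem.Chars.splitOn t.toList [' '] = wl := by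
        rw [htl]
        exact fsSplitOn_join wl hsp hwlne
      rw [hsplit, fsBody_pos limit (by omega) (List.map String.ofList wl)]
      -- names for the grouping result
      have hGok := fsGB_ok wl [] [] hok (by simp) (by simp)
      have hgb : fsGroupB (List.map String.ofList wl) [] []
          = ((fsGB wl [] []).1.map (List.map String.ofList),
             (fsGB wl [] []).2.map String.ofList) := by
        simpa using fsGroupB_eq_fsGB wl [] []
      -- the machine run
      have hglue : fsGlue [] wl = t.toList := by
        simp [fsGlue, htl]
      have hm := fsMachine_main wl [] [] hok (by simp)
      rw [PySem.Chars.join_nil, hglue] at hm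
      rw [hm, hgb]
      simp only [List.nil_append]
      rw [fsQual_eq (fsGB wl [] []).1 (fun g hg => (hGok.1 g hg).2)]
      by_cases hq : ((fsGB wl [] []).1.map
            (fun g => String.ofList (PySem.Chars.join [' '] g))).filter
            (fun s => 24 < PySem.Str.len s) = []
      · rw [if_neg (not_not_intro hq), if_neg (not_not_intro hq)]
        rcases eq_or_ne (fsGB wl [] []).2 [] with hc | hc
        · rw [hc]
          simp [PySem.Chars.join_nil]
        · have hmapne : ¬ (fsGB wl [] []).2.map String.ofList = [] := by simpa using hc
          have hjne : ¬ PySem.Chars.join [' '] (fsGB wl [] []).2 = [] :=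
            fsJoin_ne_nil _ hc (fun w hw => (hGok.2 w hw).1)
          rw [if_pos hmapne, if_pos hjne]
          rw [fsSplitOn_join (fsGB wl [] []).2
            (fun w hw => fsNoSpace w (hGok.2 w hw)) hc]
      · rw [if_pos hq, if_pos hq]
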